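-- pv_equiv track=rewrite | github.com/Kidusamare/RetrivalSystem | project_enterprise_rag/retrieval/scoring.py | parse_active_filters
-- ===== SOURCE A (Python) =====
-- from typing import Dict, Iterable, List, Optional, Sequence
--
-- def normalize_filter_tokens(active_filters: Optional[Iterable[str]]) -> List[str]:
--     cleaned: List[str] = []
--     seen = set()
--     for raw in active_filters or []:
--         token = (raw or "").strip()
--         if not token:
--             continue
--         key = token.lower()
--         if key in seen:
--             continue
--         seen.add(key)
--         cleaned.append(token)
--     return cleaned
--
-- def parse_active_filters(active_filters: Optional[Iterable[str]]) -> Dict[str, List[str]]: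
--     keyword_terms: List[str] = []
--     source_filters: List[str] = []
--     doc_filters: List[str] = []
--
--     for token in normalize_filter_tokens(active_filters):
--         lowered = token.lower()
--         if lowered.startswith("source:"):
--             source_filters.append(token.split(":", 1)[1].strip())
--             continue
--         if lowered.startswith("doc:"):
--             doc_filters.append(token.split(":", 1)[1].strip())
--             continue
--         keyword_terms.append(token)
--
--     return {
--         "keywords": keyword_terms,
--         "source": source_filters,
--         "doc": doc_filters,
--         "tokens": normalize_filter_tokens(active_filters),
--     }
-- ===== SOURCE B (Python) =====
-- from typing import Dict, Iterable, List, Optional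
--
-- def parse_active_filters(active_filters: Optional[Iterable[str]]) -> Dict[str, List[str]]:
--     # One fused scan over the raw input: strip/dedupe and classify each token
--     # immediately, instead of A's normalize-then-classify pipeline that walks
--     # the input twice via normalize_filter_tokens and once more to classify.
--     keywords: List[str] = []
--     source: List[str] = []
--     doc: List[str] = []
--     tokens: List[str] = []
--     seen = set()
--     for raw in active_filters or []:
--         token = (raw or "").strip()
--         if not token:
--             continue
--         key = token.lower()
--         if key in seen:
--             continue
--         seen.add(key)
--         tokens.append(token)
--         if key.startswith("source:"):
--             source.append(token.split(":", 1)[1].strip())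
--         elif key.startswith("doc:"):
--             doc.append(token.split(":", 1)[1].strip())
--         else:
--             keywords.append(token)
--     return {"keywords": keywords, "source": source, "doc": doc, "tokens": tokens}
-- ===== Notes on version B (the rewrite author's own statement) =====
-- stated objective: faster
-- what changed: A normalizes with a helper pass (called twice) and then classifies the cleaned tokens in another loop; B is one fused scan over the raw input that strips, dedupes against the seen-set and classifies each token immediately, maintaining all four output lists in a single accumulator, so the input is walked once instead of three times.
import Mathlib
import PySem

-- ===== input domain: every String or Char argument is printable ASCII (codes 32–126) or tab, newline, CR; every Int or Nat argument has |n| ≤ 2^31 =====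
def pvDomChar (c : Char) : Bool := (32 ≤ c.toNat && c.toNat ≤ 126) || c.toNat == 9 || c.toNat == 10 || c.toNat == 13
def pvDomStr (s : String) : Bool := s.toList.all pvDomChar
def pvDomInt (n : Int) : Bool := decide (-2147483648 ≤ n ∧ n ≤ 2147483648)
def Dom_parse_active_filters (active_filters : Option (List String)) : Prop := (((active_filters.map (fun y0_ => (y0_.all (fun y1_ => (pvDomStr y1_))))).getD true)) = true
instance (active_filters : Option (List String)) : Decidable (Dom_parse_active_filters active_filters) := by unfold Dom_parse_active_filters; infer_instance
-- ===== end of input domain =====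

-- B replaces A's normalize-then-classify pipeline (the input is walked twice by
-- normalize_filter_tokens plus once more to classify) by ONE fused scan over the
-- raw input that strips, dedupes and classifies each token as it is seen;
-- return values agree everywhere (a timing run measured B faster by a
-- constant factor: one walk over the input instead of three).

-- ===== PORT A =====
-- A's helper normalize_filter_tokens, one loop step per raw element
def pvNormStep (st : List String × PySem.Set String) (raw : String) : List String × PySem.Set String :=
  let token := PySem.Str.strip raw
  if token = "" then st
  else
    let key := PySem.Str.lower token
    if st.2.contains key then st
    else (st.1 ++ [token], st.2.add key)

def pvNormalizeFilterTokens (active_filters : Option (List String)) : List String :=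
  ((active_filters.getD []).foldl pvNormStep ([], PySem.Set.empty)).1

-- token.split(":", 1)[1].strip() — exact when ":" occurs in token (guaranteed by the prefix tests)
def pvSplitTail (token : String) : String :=
  PySem.Str.strip (PySem.List.pyGetD ((PySem.Str.splitMax? token ":" 1).getD []) 1 "")

-- A's classification loop body over an already-normalized token
def pvClassifyStep (st : List String × List String × List String) (token : String) :
    List String × List String × List String :=
  let lowered := PySem.Str.lower token
  if PySem.Str.startswith lowered "source:" then
    (st.1, st.2.1 ++ [pvSplitTail token], st.2.2)
  else if PySem.Str.startswith lowered "doc:" then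
    (st.1, st.2.1, st.2.2 ++ [pvSplitTail token])
  else (st.1 ++ [token], st.2.1, st.2.2)

def parse_active_filters (active_filters : Option (List String)) : List (String × List String) :=
  let st := (pvNormalizeFilterTokens active_filters).foldl pvClassifyStep ([], [], [])
  [("keywords", st.1), ("source", st.2.1), ("doc", st.2.2),
   ("tokens", pvNormalizeFilterTokens active_filters)]

-- ===== PORT B =====
-- one fused loop step: strip, dedupe and classify a raw element in one go
def pvFusedStep
    (st : List String × PySem.Set String × List String × List String × List String)
    (raw : String) :
    List String × PySem.Set String × List String × List String × List String :=
  let token := PySem.Str.strip raw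
  if token = "" then st
  else
    let key := PySem.Str.lower token
    if st.2.1.contains key then st
    else
      let seen' := st.2.1.add key
      let tokens' := st.1 ++ [token]
      if PySem.Str.startswith key "source:" then
        (tokens', seen', st.2.2.1, st.2.2.2.1 ++ [pvSplitTail token], st.2.2.2.2)
      else if PySem.Str.startswith key "doc:" then
        (tokens', seen', st.2.2.1, st.2.2.2.1, st.2.2.2.2 ++ [pvSplitTail token])
      else (tokens', seen', st.2.2.1 ++ [token], st.2.2.2.1, st.2.2.2.2)

def parse_active_filters_alt (active_filters : Option (List String)) : List (String × List String) :=
  let st := (active_filters.getD []).foldl pvFusedStep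
    ([], PySem.Set.empty, [], [], [])
  [("keywords", st.2.2.1), ("source", st.2.2.2.1), ("doc", st.2.2.2.2),
   ("tokens", st.1)]

-- ===== PRECONDITION & SPEC =====
def Spec_parse_active_filters (active_filters : Option (List String)) (out : List (String × List String)) : Prop := out = parse_active_filters_alt active_filters
instance (active_filters : Option (List String)) (out : List (String × List String)) : Decidable (Spec_parse_active_filters active_filters out) := by unfold Spec_parse_active_filters; infer_instance

-- ===== CLAIM (what is proved, stated in full; the proofs are below) =====
def Claim_equal_parse_active_filters : Prop := ∀ (active_filters : Option (List String)), Dom_parse_active_filters active_filters → Spec_parse_active_filters active_filters (parse_active_filters active_filters)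

-- ===== LEMMAS AND PROOFS =====
-- step-level facts shared by the two fold invariants
lemma pvNormStep_skip {st : List String × PySem.Set String} {raw : String}
    (h0 : PySem.Str.strip raw = "" ∨ PySem.Str.lower (PySem.Str.strip raw) ∈ st.2) :
    pvNormStep st raw = st := by
  rcases h0 with h0 | h0 <;> simp [pvNormStep, h0]

lemma pvNormStep_push {st : List String × PySem.Set String} {raw : String}
    (h0 : ¬ PySem.Str.strip raw = "")
    (h1 : PySem.Str.lower (PySem.Str.strip raw) ∉ st.2) :
    pvNormStep st raw
      = (st.1 ++ [PySem.Str.strip raw], st.2.add (PySem.Str.lower (PySem.Str.strip raw))) := by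
  simp [pvNormStep, h0, h1]

lemma pvFusedStep_skip {st : List String × PySem.Set String × List String × List String × List String}
    {raw : String}
    (h0 : PySem.Str.strip raw = "" ∨ PySem.Str.lower (PySem.Str.strip raw) ∈ st.2.1) :
    pvFusedStep st raw = st := by
  rcases h0 with h0 | h0 <;> simp [pvFusedStep, h0]

lemma pvFusedStep_push {st : List String × PySem.Set String × List String × List String × List String}
    {raw : String}
    (h0 : ¬ PySem.Str.strip raw = "")
    (h1 : PySem.Str.lower (PySem.Str.strip raw) ∉ st.2.1) :
    pvFusedStep st raw
      = (st.1 ++ [PySem.Str.strip raw], st.2.1.add (PySem.Str.lower (PySem.Str.strip raw)),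
         pvClassifyStep (st.2.2.1, st.2.2.2.1, st.2.2.2.2) (PySem.Str.strip raw)) := by
  have hc : st.2.1.contains (PySem.Str.lower (PySem.Str.strip raw)) = false := by
    simp [h1]
  simp only [pvFusedStep, pvClassifyStep, h0, hc, Bool.false_eq_true, if_false]
  split_ifs <;> rfl

-- the normalize fold only reads the seen-set; the token accumulator is append-only
lemma pv_norm_append (l : List String) (tok : List String) (seen : PySem.Set String) :
    l.foldl pvNormStep (tok, seen)
      = (tok ++ (l.foldl pvNormStep ([], seen)).1, (l.foldl pvNormStep ([], seen)).2) := by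
  induction l generalizing tok seen with
  | nil => simp
  | cons r l ih =>
    simp only [List.foldl_cons]
    by_cases h0 : PySem.Str.strip r = ""
    · rw [pvNormStep_skip (Or.inl h0), pvNormStep_skip (Or.inl h0), ih]
    · by_cases h1 : PySem.Str.lower (PySem.Str.strip r) ∈ seen
      · rw [pvNormStep_skip (Or.inr h1), pvNormStep_skip (Or.inr h1), ih]
      · rw [pvNormStep_push h0 h1, pvNormStep_push h0 h1]
        simp only [List.nil_append]
        rw [ih (tok ++ [PySem.Str.strip r]), ih [PySem.Str.strip r]]
        simp

-- the fused fold computes the normalize fold and the classify fold of the new tokens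
lemma pv_fused_eq (l : List String) (tok : List String) (seen : PySem.Set String)
    (kw src doc : List String) :
    l.foldl pvFusedStep (tok, seen, kw, src, doc)
      = ((l.foldl pvNormStep (tok, seen)).1, (l.foldl pvNormStep (tok, seen)).2,
         ((l.foldl pvNormStep ([], seen)).1).foldl pvClassifyStep (kw, src, doc)) := by
  induction l generalizing tok seen kw src doc with
  | nil => simp
  | cons r l ih =>
    simp only [List.foldl_cons]
    by_cases h0 : PySem.Str.strip r = ""
    · rw [pvFusedStep_skip (Or.inl h0), pvNormStep_skip (Or.inl h0),
          pvNormStep_skip (Or.inl h0), ih]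
    · by_cases h1 : PySem.Str.lower (PySem.Str.strip r) ∈ seen
      · rw [pvFusedStep_skip (Or.inr h1), pvNormStep_skip (Or.inr h1),
            pvNormStep_skip (Or.inr h1), ih]
      · rw [pvFusedStep_push h0 h1, pvNormStep_push h0 h1, pvNormStep_push h0 h1]
        simp only [List.nil_append]
        rw [ih]
        rw [pv_norm_append l [PySem.Str.strip r]
              (seen.add (PySem.Str.lower (PySem.Str.strip r)))]
        simp

-- ===== VERDICT (by name: the statement is the Claim_ definition above) =====
theorem parse_active_filters_spec : Claim_equal_parse_active_filters := by
  intro af _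
  unfold Spec_parse_active_filters parse_active_filters parse_active_filters_alt
    pvNormalizeFilterTokens
  rw [pv_fused_eq]
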